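-- pv_equiv track=rewrite | github.com/superben0116-debug/MINDIGO | app/backend/app/routers/internal_orders.py | _choose_package
-- ===== SOURCE A (Python) =====
-- def _choose_package(packages):
--     if not packages:
--         return {}
--     fedex = [p for p in packages if "fedex" in (p.get("carrier") or "").lower() and p.get("tracking")]
--     if fedex:
--         return fedex[-1]
--     with_tracking = [p for p in packages if p.get("tracking")]
--     if with_tracking:
--         return with_tracking[-1]
--     return packages[-1]
-- ===== SOURCE B (Python) =====
-- def _choose_package(packages):
--     if not packages:
--         return {}
--
--     def rank(p):
--         if "fedex" in (p.get("carrier") or "").lower() and p.get("tracking"):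
--             return 2
--         if p.get("tracking"):
--             return 1
--         return 0
--
--     # pick the package with the highest (rank, position) lexicographic key:
--     # the last package attaining the best rank
--     return max(enumerate(packages), key=lambda ip: (rank(ip[1]), ip[0]))[1]
-- ===== Notes on version B (the rewrite author's own statement) =====
-- stated objective: alternative
-- what changed: Replaced A's staged filter-then-take-last passes and fallback chain by a single argmax: each package gets a rank (2 fedex+tracking, 1 tracking, 0 otherwise) and B returns max(enumerate(packages), key=(rank, index)), i.e. one lexicographic maximum selection instead of three scans with early returns.
import Mathlib
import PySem

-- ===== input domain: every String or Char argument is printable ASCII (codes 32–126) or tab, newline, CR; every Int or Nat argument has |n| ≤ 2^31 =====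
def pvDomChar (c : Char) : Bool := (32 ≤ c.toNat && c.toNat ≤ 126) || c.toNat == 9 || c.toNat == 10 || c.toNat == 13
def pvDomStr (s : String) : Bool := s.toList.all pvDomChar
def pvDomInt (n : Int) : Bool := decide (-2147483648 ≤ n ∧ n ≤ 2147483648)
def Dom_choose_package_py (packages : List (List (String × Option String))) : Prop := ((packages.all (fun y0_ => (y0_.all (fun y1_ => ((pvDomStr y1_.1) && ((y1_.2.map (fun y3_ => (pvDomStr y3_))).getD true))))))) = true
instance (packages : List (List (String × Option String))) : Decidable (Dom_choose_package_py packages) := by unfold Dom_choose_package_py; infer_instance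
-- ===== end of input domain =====

-- B replaces A's staged filter passes by a single argmax over (rank, index); same O(n) cost, no speed claim.

-- shared truthiness tests that both Pythons write textually
-- p.get("tracking") is truthy: key present, value not None and not ""
def pvHasTracking (p : List (String × Option String)) : Bool :=
  match PySem.Dict.get? (PySem.Dict.mk p) "tracking" with
  | some (some s) => s ≠ ""
  | _ => false

-- "fedex" in (p.get("carrier") or "").lower() and p.get("tracking")
def pvIsFedex (p : List (String × Option String)) : Bool :=
  PySem.Str.isIn "fedex" (PySem.Str.lower (((PySem.Dict.get? (PySem.Dict.mk p) "carrier").getD none).getD "")) && pvHasTracking p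

-- ===== PORT A =====
def choose_package_py (packages : List (List (String × Option String))) : List (String × Option String) :=
  if packages.isEmpty then []
  else
    let fedex := packages.filter pvIsFedex
    match fedex.getLast? with            -- 'if fedex: return fedex[-1]'
    | some p => p
    | none =>
      let with_tracking := packages.filter pvHasTracking
      match with_tracking.getLast? with  -- 'if with_tracking: return with_tracking[-1]'
      | some p => p
      | none => PySem.List.pyGetD packages (-1) []   -- packages[-1]

-- ===== PORT B =====
-- B's rank helper
def pvRank (p : List (String × Option String)) : Int :=
  if pvIsFedex p then 2 else if pvHasTracking p then 1 else 0

def choose_package_py_alt (packages : List (List (String × Option String))) : List (String × Option String) :=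
  if packages.isEmpty then []
  else
    -- max(enumerate(packages), key=lambda ip: (rank(ip[1]), ip[0]))[1]
    match PySem.List.max2? (PySem.List.enumerate packages) (fun ip => pvRank ip.2) (fun ip => ip.1) with
    | some ip => ip.2
    | none => []   -- unreachable: packages nonempty

-- ===== PRECONDITION & SPEC =====
def Spec_choose_package_py (packages : List (List (String × Option String))) (out : List (String × Option String)) : Prop := out = choose_package_py_alt packages
instance (packages : List (List (String × Option String))) (out : List (String × Option String)) : Decidable (Spec_choose_package_py packages out) := by unfold Spec_choose_package_py; infer_instance

-- ===== CLAIM (what is proved, stated in full; the proofs are below) =====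
def Claim_equal_choose_package_py : Prop := ∀ (packages : List (List (String × Option String))), Dom_choose_package_py packages → Spec_choose_package_py packages (choose_package_py packages)

-- ===== LEMMAS AND PROOFS =====

-- the plain (index-free) last-argmax step function that B's lex-max fold reduces to
def pvStep (acc : Option (List (String × Option String))) (x : List (String × Option String)) :
    Option (List (String × Option String)) :=
  match acc with
  | none => some x
  | some m => if pvRank x < pvRank m then some m else some x

-- Layer 1: B's max2? fold over enumerate, with strictly increasing indices, is the index-free fold
-- the step function of PySem.List.max2? instantiated with B's two keys
def pvG (acc : Option (Int × List (String × Option String))) (x : Int × List (String × Option String)) :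
    Option (Int × List (String × Option String)) :=
  match acc with
  | none => some x
  | some m =>
    if (decide (pvRank m.2 < pvRank x.2) || (!decide (pvRank x.2 < pvRank m.2) && decide (m.1 < x.1))) = true
    then some x else some m

theorem pv_max2_enum (xs : List (List (String × Option String))) :
    ∀ (s : Int) (acc : Option (Int × List (String × Option String))),
      (∀ i m, acc = some (i, m) → i < s) →
      ((PySem.List.enumerate xs s).foldl pvG acc).map Prod.snd
        = xs.foldl pvStep (acc.map Prod.snd) := by
  induction xs with
  | nil => intro s acc _; simp [PySem.List.enumerate_nil]
  | cons x xs ih =>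
    intro s acc hinv
    rw [PySem.List.enumerate_cons]
    simp only [List.foldl_cons]
    cases acc with
    | none =>
      have hg : pvG none (s, x) = some (s, x) := rfl
      rw [hg, ih (s + 1) (some (s, x)) (by intro i m h; cases h; omega)]
      simp [pvStep]
    | some im =>
      obtain ⟨i, m⟩ := im
      have hi : i < s := hinv i m rfl
      by_cases hlt : pvRank x < pvRank m
      · have hg : pvG (some (i, m)) (s, x) = some (i, m) := by
          simp [pvG, hlt, show ¬ pvRank m < pvRank x by omega]
        rw [hg, ih (s + 1) (some (i, m)) (by intro j n h; cases h; omega)]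
        simp [pvStep, hlt]
      · have hg : pvG (some (i, m)) (s, x) = some (s, x) := by
          simp [pvG, hlt, hi]
        rw [hg, ih (s + 1) (some (s, x)) (by intro j n h; cases h; omega)]
        simp [pvStep, hlt]

-- A's selection written as an Option-valued staged choice
def pvStaged (xs : List (List (String × Option String))) : Option (List (String × Option String)) :=
  match (xs.filter pvIsFedex).getLast? with
  | some p => some p
  | none =>
    match (xs.filter pvHasTracking).getLast? with
    | some p => some p
    | none => xs.getLast?

-- if the last-of-filter is empty, no member satisfies the predicate
theorem pv_filter_last_none {f : List (String × Option String) → Bool}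
    {xs : List (List (String × Option String))} {y : List (String × Option String)}
    (hf : (xs.filter f).getLast? = none) (hy : y ∈ xs) : f y = false := by
  have hnil := List.getLast?_eq_none_iff.mp hf
  by_cases h : f y
  · exact absurd (List.mem_filter.mpr ⟨hy, h⟩) (by simp [hnil])
  · simpa using h

-- getLast? of a filter after appending one element
theorem pv_last_filter_append (f : List (String × Option String) → Bool)
    (xs : List (List (String × Option String))) (x : List (String × Option String)) :
    ((xs ++ [x]).filter f).getLast? = if f x then some x else (xs.filter f).getLast? := by
  rw [List.filter_append]
  by_cases h : f x <;> simp [h, List.getLast?_append]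

-- Layer 2 step: appending one element to the staged choice is exactly pvStep
theorem pv_staged_append (xs : List (List (String × Option String)))
    (x : List (String × Option String)) :
    pvStaged (xs ++ [x]) = pvStep (pvStaged xs) x := by
  cases hs : pvStaged xs with
  | none =>
    -- staged of xs is none only when xs = []
    have : xs = [] := by
      unfold pvStaged at hs
      cases hf : (xs.filter pvIsFedex).getLast? with
      | some p => rw [hf] at hs; cases hs
      | none =>
        rw [hf] at hs
        cases ht : (xs.filter pvHasTracking).getLast? with
        | some p => rw [ht] at hs; cases hs
        | none =>
          rw [ht] at hs
          exact List.getLast?_eq_none_iff.mp hs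
    subst this
    simp only [List.nil_append, pvStaged, pvStep, List.filter]
    by_cases h1 : pvIsFedex x <;> by_cases h2 : pvHasTracking x <;> simp [h1, h2]
  | some m =>
    unfold pvStaged at hs
    unfold pvStaged
    rw [pv_last_filter_append, pv_last_filter_append, List.getLast?_append]
    simp only [List.getLast?_singleton]
    cases hf : (xs.filter pvIsFedex).getLast? with
    | some p =>
      -- case A: xs has a fedex package; m is its last one, rank 2
      rw [hf] at hs; cases hs
      have hfm : pvIsFedex m := (List.mem_filter.mp (List.mem_of_getLast? hf)).2
      have hrm : pvRank m = 2 := by simp [pvRank, hfm]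
      by_cases hfx : pvIsFedex x
      · have hrx : pvRank x = 2 := by simp [pvRank, hfx]
        simp [hfx, pvStep, hrx, hrm]
      · have hrx : pvRank x ≤ 1 := by unfold pvRank; simp [hfx]; split_ifs <;> omega
        simp [hfx, pvStep, hrm]
        omega
    | none =>
      rw [hf] at hs
      cases ht : (xs.filter pvHasTracking).getLast? with
      | some p =>
        -- case B: no fedex in xs, but tracking; m is the last tracking one, rank 1
        rw [ht] at hs; cases hs
        have hmem : m ∈ xs := (List.mem_filter.mp (List.mem_of_getLast? ht)).1
        have hfm : pvIsFedex m = false := pv_filter_last_none hf hmem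
        have htm : pvHasTracking m := (List.mem_filter.mp (List.mem_of_getLast? ht)).2
        have hrm : pvRank m = 1 := by simp [pvRank, hfm, htm]
        by_cases hfx : pvIsFedex x
        · have hrx : pvRank x = 2 := by simp [pvRank, hfx]
          simp [hfx, pvStep, hrx, hrm]
        · by_cases htx : pvHasTracking x
          · have hrx : pvRank x = 1 := by simp [pvRank, hfx, htx]
            simp [hfx, htx, pvStep, hrx, hrm]
          · have hrx : pvRank x = 0 := by simp [pvRank, hfx, htx]
            simp [hfx, htx, pvStep, hrx, hrm]
      | none =>
        -- case C: neither fedex nor tracking in xs; m is the plain last element, rank 0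
        rw [ht] at hs
        have hmem : m ∈ xs := List.mem_of_getLast? hs
        have hfm : pvIsFedex m = false := pv_filter_last_none hf hmem
        have htm : pvHasTracking m = false := pv_filter_last_none ht hmem
        have hrm : pvRank m = 0 := by simp [pvRank, hfm, htm]
        by_cases hfx : pvIsFedex x
        · have hrx : pvRank x = 2 := by simp [pvRank, hfx]
          simp [hfx, pvStep, hrx, hrm]
        · by_cases htx : pvHasTracking x
          · have hrx : pvRank x = 1 := by simp [pvRank, hfx, htx]
            simp [hfx, htx, pvStep, hrx, hrm]
          · have hrx : pvRank x = 0 := by simp [pvRank, hfx, htx]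
            simp [hfx, htx, hs, pvStep, hrx, hrm]

-- Layer 2: the index-free fold computes A's staged choice
theorem pv_fold_staged (xs : List (List (String × Option String))) :
    xs.foldl pvStep none = pvStaged xs := by
  induction xs using List.reverseRecOn with
  | nil => simp [pvStaged]
  | append_singleton ys x ih =>
    rw [List.foldl_append, List.foldl_cons, List.foldl_nil, ih, ← pv_staged_append]

-- ===== VERDICT (by name: the statement is the Claim_ definition above) =====
theorem choose_package_py_spec : Claim_equal_choose_package_py := by
  intro packages _
  unfold Spec_choose_package_py choose_package_py choose_package_py_alt
  by_cases h : packages.isEmpty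
  · simp [h]
  · simp only [h, if_neg, Bool.false_eq_true, not_false_iff]
    have hnil : packages ≠ [] := by simpa [List.isEmpty_iff] using h
    have hB := pv_max2_enum packages 0 none (by intro i m hc; cases hc)
    simp only [Option.map_none] at hB
    rw [pv_fold_staged] at hB
    have hmax : PySem.List.max2? (PySem.List.enumerate packages)
        (fun ip => pvRank ip.2) (fun ip => ip.1)
        = (PySem.List.enumerate packages 0).foldl pvG none := by
      unfold PySem.List.max2?
      exact List.foldl_ext _ _ _ (fun a x _ => by cases a <;> rfl)
    rw [hmax]
    -- rewrite B's side using the two layers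
    cases hst : pvStaged packages with
    | none =>
      exfalso
      unfold pvStaged at hst
      cases hf : (packages.filter pvIsFedex).getLast? with
      | some p => rw [hf] at hst; cases hst
      | none =>
        rw [hf] at hst
        cases ht : (packages.filter pvHasTracking).getLast? with
        | some p => rw [ht] at hst; cases hst
        | none => rw [ht] at hst; exact hnil (List.getLast?_eq_none_iff.mp hst)
    | some m =>
      rw [hst] at hB
      obtain ⟨ip, hip, hip2⟩ : ∃ ip, ((PySem.List.enumerate packages 0).foldl pvG none) = some ip ∧ ip.2 = m := by
        cases hfold : ((PySem.List.enumerate packages 0).foldl pvG none) with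
        | none => rw [hfold] at hB; cases hB
        | some ip => rw [hfold] at hB; exact ⟨ip, rfl, Option.some.inj hB⟩
      rw [hip]
      unfold pvStaged at hst
      cases hf : (packages.filter pvIsFedex).getLast? with
      | some p => rw [hf] at hst; cases hst; simp [hip2]
      | none =>
        rw [hf] at hst
        cases ht : (packages.filter pvHasTracking).getLast? with
        | some p => rw [ht] at hst; cases hst; simp [hip2]
        | none =>
          rw [ht] at hst
          show PySem.List.pyGetD packages (-1) [] = ip.2
          rw [PySem.List.pyGetD_neg_one packages [] hnil, hip2]
          rw [List.getLast?_eq_some_getLast hnil] at hst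
          exact Option.some.inj hst
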